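-- pv_equiv track=rewrite | github.com/sweepai/sweep | sweepai/agents/modify_utils.py | get_surrounding_lines
-- ===== SOURCE A (Python) =====
-- def get_surrounding_lines(file_contents: str, best_match: str) -> tuple[str, str]:
--     best_match_index = file_contents.find(best_match)
--     surrounding_lines_before = "\n"
--     surrounding_lines_after = ""
--     if best_match_index != -1:
--         # OPUS START - this is a hacky way to get the surrounding lines, doesn't handle inline \n
--         # Find the index of the fifth \n before the best_match_index
--         best_match_start = max(0, file_contents.rfind("\n", 0, best_match_index))
--         NUM_LINES_SURROUNDING = 6
--         for _ in range(NUM_LINES_SURROUNDING - 1):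
--             best_match_start = max(0, file_contents.rfind("\n", 0, best_match_start))
--
--         # Find the index of the fifth \n after the best_match_index
--         best_match_end = best_match_index + len(best_match)
--         for _ in range(NUM_LINES_SURROUNDING * 2): # 2x the number of lines surrounding after for now
--             best_match_end = file_contents.find("\n", best_match_end + 1)
--             if best_match_end == -1:
--                 best_match_end = len(file_contents)
--                 break
--         # OPUS END
--         surrounding_lines_before = file_contents[best_match_start:best_match_index]
--         surrounding_lines_after = file_contents[best_match_index:best_match_end]
--     return surrounding_lines_before, surrounding_lines_after
-- ===== SOURCE B (Python) =====
-- def get_surrounding_lines(file_contents: str, best_match: str) -> tuple[str, str]: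
--     idx = file_contents.find(best_match)
--     if idx == -1:
--         return "\n", ""
--     # positions of every newline, one pass
--     nls = [i for i, c in enumerate(file_contents) if c == "\n"]
--     before = [i for i in nls if i < idx]
--     start = before[-6] if len(before) >= 6 else 0
--     end_pos = idx + len(best_match)
--     after = [i for i in nls if i > end_pos]
--     end = after[11] if len(after) >= 12 else len(file_contents)
--     return file_contents[start:idx], file_contents[idx:end]
-- ===== Notes on version B (the rewrite author's own statement) =====
-- stated objective: alternative
-- what changed: A repeatedly rescans the text with 5 incremental rfind calls and up to 12 incremental find calls; B builds the list of all newline indices in one pass and directly picks the 6th newline strictly before the match (clamped to 0) and the 12th newline strictly after the match end (defaulting to len).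
import Mathlib
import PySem

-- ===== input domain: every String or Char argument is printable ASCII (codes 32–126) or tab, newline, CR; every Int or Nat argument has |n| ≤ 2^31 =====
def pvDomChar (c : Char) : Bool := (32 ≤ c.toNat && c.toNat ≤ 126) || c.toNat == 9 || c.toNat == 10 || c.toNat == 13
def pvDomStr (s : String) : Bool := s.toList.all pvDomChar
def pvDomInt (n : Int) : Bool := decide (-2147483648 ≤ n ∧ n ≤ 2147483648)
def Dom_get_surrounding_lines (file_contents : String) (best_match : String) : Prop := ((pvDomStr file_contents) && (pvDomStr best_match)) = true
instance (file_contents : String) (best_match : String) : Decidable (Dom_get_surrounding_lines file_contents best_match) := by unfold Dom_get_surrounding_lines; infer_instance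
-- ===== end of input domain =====

-- B replaces A's twelve repeated rfind/find scans by one newline-index list built in
-- a single pass, then picks the clamped 6th newline before / 12th after the match
-- (objective: alternative single-pass decomposition; equal return value proved below).

-- ===== PORT A =====
def get_surrounding_lines (file_contents : String) (best_match : String) : String × String :=
  let best_match_index := PySem.Str.find file_contents best_match
  let surrounding_lines_before := "\n"
  let surrounding_lines_after := ""
  if best_match_index ≠ -1 then
    let best_match_start := max 0 (PySem.Str.rfindFrom file_contents "\n" 0 (some best_match_index))
    let best_match_start := (PySem.List.pyRange 0 5 1).foldl
      (fun s _ => max 0 (PySem.Str.rfindFrom file_contents "\n" 0 (some s))) best_match_start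
    let best_match_end := best_match_index + PySem.Str.len best_match
    let r := (PySem.List.pyRange 0 12 1).foldl
      (fun (p : Int × Bool) _ =>
        if p.2 then p
        else
          let e := PySem.Str.findFrom file_contents "\n" (p.1 + 1) none
          if e = -1 then (PySem.Str.len file_contents, true) else (e, false))
      (best_match_end, false)
    (PySem.Str.slice file_contents (some best_match_start) (some best_match_index),
     PySem.Str.slice file_contents (some best_match_index) (some r.1))
  else (surrounding_lines_before, surrounding_lines_after)

-- ===== PORT B =====
def get_surrounding_lines_alt (file_contents : String) (best_match : String) : String × String :=
  let idx := PySem.Str.find file_contents best_match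
  if idx = -1 then ("\n", "")
  else
    let nls : List Int := ((PySem.List.enumerate file_contents.toList 0).filter
      (fun p => p.2 == '\n')).map (·.1)
    let before := nls.filter (fun i => i < idx)
    let start : Int := if 6 ≤ before.length then (PySem.List.pyGet? before (-6)).getD 0 else 0
    let endPos := idx + PySem.Str.len best_match
    let after := nls.filter (fun i => endPos < i)
    let e : Int := if 12 ≤ after.length then (PySem.List.pyGet? after 11).getD 0
                   else PySem.Str.len file_contents
    (PySem.Str.slice file_contents (some start) (some idx),
     PySem.Str.slice file_contents (some idx) (some e))

-- ===== PRECONDITION & SPEC =====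
def Spec_get_surrounding_lines (file_contents : String) (best_match : String) (out : String × String) : Prop := out = get_surrounding_lines_alt file_contents best_match
instance (file_contents : String) (best_match : String) (out : String × String) : Decidable (Spec_get_surrounding_lines file_contents best_match out) := by unfold Spec_get_surrounding_lines; infer_instance

-- ===== CLAIM (what is proved, stated in full; the proofs are below) =====
def Claim_equal_get_surrounding_lines : Prop := ∀ (file_contents : String) (best_match : String), Dom_get_surrounding_lines file_contents best_match → Spec_get_surrounding_lines file_contents best_match (get_surrounding_lines file_contents best_match)

-- ===== LEMMAS AND PROOFS =====

-- nlIdx cs = the ascending list of indices of '\n' in cs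
def nlIdx : List Char → List Nat
  | [] => []
  | c :: t => (if c = '\n' then [0] else []) ++ (nlIdx t).map (· + 1)

theorem nlIdx_mem (cs : List Char) (i : Nat) : i ∈ nlIdx cs ↔ cs[i]? = some '\n' := by
  induction cs generalizing i with
  | nil => simp [nlIdx]
  | cons c t ih =>
    cases i with
    | zero => simp only [nlIdx, List.mem_append, List.getElem?_cons_zero]; split <;> simp_all
    | succ j =>
      simp only [nlIdx, List.mem_append, List.mem_map, List.getElem?_cons_succ, ← ih]
      constructor
      · rintro (h | ⟨a, ha, hj⟩)
        · split at h <;> simp_all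
        · obtain rfl : a = j := by omega
          exact ha
      · intro h; exact Or.inr ⟨j, h, rfl⟩

theorem nlIdx_pairwise (cs : List Char) : (nlIdx cs).Pairwise (· < ·) := by
  induction cs with
  | nil => simp [nlIdx]
  | cons c t ih =>
    simp only [nlIdx]
    refine List.pairwise_append.mpr ⟨?_, List.Pairwise.map _ (by omega) ih, ?_⟩
    · split <;> simp
    · intro a ha b hb
      simp only [List.mem_map] at hb
      obtain ⟨x, _, rfl⟩ := hb
      split at ha <;> simp_all

theorem nlIdx_lt_length (cs : List Char) (i : Nat) (h : i ∈ nlIdx cs) : i < cs.length := by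
  rw [nlIdx_mem] at h
  exact (List.getElem?_eq_some_iff.mp h).choose

theorem nlIdx_take (cs : List Char) (x : Nat) :
    nlIdx (cs.take x) = (nlIdx cs).filter (fun i => decide (i < x)) := by
  induction cs generalizing x with
  | nil => simp [nlIdx]
  | cons c t ih =>
    cases x with
    | zero =>
      simp only [List.take_zero, nlIdx, List.filter_append, List.filter_map]
      have h1 : (List.filter (fun i => decide (i < 0)) (if c = '\n' then [0] else [])) = [] := by
        split <;> simp
      rw [h1]
      have h2 : (List.filter ((fun i => decide (i < 0)) ∘ fun x => x + 1) (nlIdx t)) = [] := by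
        apply List.filter_eq_nil_iff.mpr; intro a _; simp
      rw [h2]
      simp
    | succ y =>
      simp only [List.take_succ_cons, nlIdx, ih, List.filter_append, List.filter_map]
      congr 1
      · split <;> simp
      · congr 1
        refine (List.filter_congr ?_).symm
        intro a _
        simp only [Function.comp_apply, decide_eq_decide]
        omega

theorem nlIdx_drop (cs : List Char) (k : Nat) :
    nlIdx (cs.drop k) = ((nlIdx cs).filter (fun i => decide (k ≤ i))).map (· - k) := by
  induction cs generalizing k with
  | nil => simp [nlIdx]
  | cons c t ih =>
    cases k with
    | zero => simp [nlIdx]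
    | succ m =>
      simp only [List.drop_succ_cons, nlIdx, ih, List.filter_append, List.filter_map, List.map_append, List.map_map]
      have h1 : (List.filter (fun i => decide (m + 1 ≤ i)) (if c = '\n' then [0] else [])) = [] := by
        split <;> simp
      rw [h1]
      have h2 : (List.filter ((fun i => decide (m + 1 ≤ i)) ∘ fun x => x + 1) (nlIdx t))
          = List.filter (fun i => decide (m ≤ i)) (nlIdx t) := by
        apply List.filter_congr; intro a _
        simp only [Function.comp_apply, decide_eq_decide]
        omega
      rw [h2]
      congr 1
      funext i
      simp only [Function.comp_apply]
      omega

theorem nlIdx_enumerate (cs : List Char) (s : Int) :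
    ((PySem.List.enumerate cs s).filter (fun p => p.2 == '\n')).map (·.1)
      = List.map (fun i : Nat => s + (i : Int)) (nlIdx cs) := by
  induction cs generalizing s with
  | nil => simp [nlIdx, PySem.List.enumerate_nil]
  | cons c t ih =>
    simp only [PySem.List.enumerate_cons, List.filter_cons, nlIdx, List.map_append, List.map_map]
    have hmm : List.map ((fun i : Nat => s + (i : Int)) ∘ fun x => x + 1) (nlIdx t)
        = List.map (fun i : Nat => (s + 1) + (i : Int)) (nlIdx t) := by
      congr 1
      funext i
      simp only [Function.comp_apply]
      push_cast; ring
    by_cases hc : c = '\n'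
    · simp only [hc, beq_self_eq_true, if_pos, List.map_cons, ih, hmm]
      simp
    · have : (c == '\n') = false := by simp [hc]
      simp only [this, Bool.false_eq_true, reduceIte, ih, hmm]
      split
      · simp_all
      · simp

theorem nl_prefix_cons (c : Char) (t : List Char) :
    (['\n'].isPrefixOf (c :: t) = true) ↔ c = '\n' := by
  rw [List.isPrefixOf_iff_prefix, List.cons_prefix_iff]
  simp

theorem nl_prefix_iff (l : List Char) : (['\n'].isPrefixOf l = true) ↔ l[0]? = some '\n' := by
  cases l with
  | nil => simp [show (['\n'].isPrefixOf ([] : List Char)) = false from rfl]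
  | cons c t =>
    rw [nl_prefix_cons]
    simp

theorem nl_prefix_drop (cs : List Char) (j : Nat) :
    (['\n'].isPrefixOf (cs.drop j) = true) ↔ j ∈ nlIdx cs := by
  rw [nl_prefix_iff, nlIdx_mem]
  simp

theorem find_go_nl (cs : List Char) (k : Nat) :
    PySem.Chars.find.go ['\n'] cs k =
      match nlIdx cs with
      | [] => -1
      | i :: _ => ((k + i : Nat) : Int) := by
  induction cs generalizing k with
  | nil => simp [PySem.Chars.find.go, nlIdx]
  | cons c t ih =>
    rw [PySem.Chars.find.go]
    by_cases hc : c = '\n'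
    · have hp : ['\n'].isPrefixOf (c :: t) = true := (nl_prefix_cons c t).mpr hc
      simp [nlIdx, hc]
    · have hp : ['\n'].isPrefixOf (c :: t) = false := by
        rw [Bool.eq_false_iff]; intro h; exact hc ((nl_prefix_cons c t).mp h)
      simp only [hp, Bool.false_eq_true, ih, nlIdx, hc, if_false]
      cases h : nlIdx t with
      | nil => simp
      | cons i r =>
        simp only [List.map_cons, List.nil_append]
        congr 1
        omega

theorem find_nl (cs : List Char) :
    PySem.Chars.find cs ['\n'] =
      match nlIdx cs with
      | [] => -1
      | i :: _ => (i : Int) := by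
  rw [PySem.Chars.find, find_go_nl]
  cases nlIdx cs <;> simp

theorem filter_le_getLast (l : List Nat) (hl : l.Pairwise (· < ·)) (x : Nat) (hx : x ∈ l) :
    (l.filter (fun i => decide (i ≤ x))).getLast? = some x := by
  induction l with
  | nil => simp at hx
  | cons a t ih =>
    rw [List.pairwise_cons] at hl
    rcases List.mem_cons.mp hx with h1 | hxt
    · subst h1
      have ht : t.filter (fun i => decide (i ≤ x)) = [] := by
        apply List.filter_eq_nil_iff.mpr
        intro b hb
        have := hl.1 b hb
        simp; omega
      simp [ht]
    · have hax : a ≤ x := le_of_lt (hl.1 x hxt)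
      have hlast := ih hl.2 hxt
      simp only [List.filter_cons, hax, decide_true, if_pos]
      rw [List.getLast?_cons, hlast]
      rfl

theorem rfind_go_nl (cs : List Char) (j : Nat) :
    PySem.Chars.rfind.go cs ['\n'] j =
      ((nlIdx cs).filter (fun i => decide (i ≤ j))).getLast?.elim (-1) (fun i => (i : Int)) := by
  induction j with
  | zero =>
    rw [PySem.Chars.rfind.go]
    by_cases h0 : 0 ∈ nlIdx cs
    · have hp : ['\n'].isPrefixOf cs = true := by
        simpa using (nl_prefix_drop cs 0).mpr h0
      rw [filter_le_getLast _ (nlIdx_pairwise cs) 0 h0]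
      simp [hp]
    · have hp : ['\n'].isPrefixOf cs = false := by
        rw [Bool.eq_false_iff]
        intro h
        exact h0 ((nl_prefix_drop cs 0).mp (by simpa using h))
      have hf : (nlIdx cs).filter (fun i => decide (i ≤ 0)) = [] := by
        apply List.filter_eq_nil_iff.mpr
        intro b hb
        simp only [decide_eq_true_eq]
        intro hle
        have : b = 0 := by omega
        exact h0 (this ▸ hb)
      rw [hf]
      simp [hp]
  | succ j ih =>
    rw [PySem.Chars.rfind.go]
    by_cases hj : (j + 1) ∈ nlIdx cs
    · have hp := (nl_prefix_drop cs (j+1)).mpr hj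
      rw [filter_le_getLast _ (nlIdx_pairwise cs) (j+1) hj]
      simp [hp]
    · have hp : ['\n'].isPrefixOf (cs.drop (j+1)) = false := by
        rw [Bool.eq_false_iff]; intro h; exact hj ((nl_prefix_drop cs (j+1)).mp h)
      have hf : (nlIdx cs).filter (fun i => decide (i ≤ j + 1))
          = (nlIdx cs).filter (fun i => decide (i ≤ j)) := by
        apply List.filter_congr
        intro a ha
        simp only [decide_eq_decide]
        constructor
        · intro h
          by_cases he : a = j + 1
          · exact absurd (he ▸ ha) hj
          · omega
        · omega
      simp [hp, hf, ih]

theorem rfind_nl (cs : List Char) :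
    PySem.Chars.rfind cs ['\n'] = ((nlIdx cs).getLast?).elim (-1) (fun i => (i : Int)) := by
  rw [PySem.Chars.rfind, rfind_go_nl]
  have hf : (nlIdx cs).filter (fun i => decide (i ≤ cs.length)) = nlIdx cs := by
    apply List.filter_eq_self.mpr
    intro a ha
    simp only [decide_eq_true_eq]
    exact le_of_lt (nlIdx_lt_length cs a ha)
  rw [hf]

theorem rfindFrom_nl (cs : List Char) (x : Nat) (hx : x ≤ cs.length) :
    PySem.Chars.rfindFrom cs ['\n'] 0 (some (x : Int)) =
      (((nlIdx cs).filter (fun i => decide (i < x))).getLast?).elim (-1) (fun i => (i : Int)) := by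
  rw [PySem.Chars.rfindFrom]
  have h1 : ¬ ((cs.length : Int) < (x : Int)) := by exact_mod_cast not_lt.mpr hx
  have h2 : ¬ ((x : Int) < 0) := not_lt.mpr (Int.natCast_nonneg x)
  have h00 : ¬ ((0 : Int) < 0) := by norm_num
  simp only [h1, h2, h00, if_false]
  have htake : List.drop (Int.toNat 0) (List.take ((x : Int)).toNat cs) = cs.take x := by simp
  rw [htake, rfind_nl, nlIdx_take]
  cases h : ((nlIdx cs).filter (fun i => decide (i < x))).getLast? with
  | none => simp
  | some i => simp

theorem findFrom_nl (cs : List Char) (m : Nat) :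
    PySem.Chars.findFrom cs ['\n'] (m : Int) none =
      (((nlIdx cs).filter (fun i => decide (m ≤ i))).head?).elim (-1) (fun i => (i : Int)) := by
  by_cases hm : m ≤ cs.length
  · rw [PySem.Chars.findFrom_natCast cs ['\n'] m hm, find_nl, nlIdx_drop]
    cases h : (nlIdx cs).filter (fun i => decide (m ≤ i)) with
    | nil => simp
    | cons i r =>
      have him : m ≤ i := by
        have : i ∈ (nlIdx cs).filter (fun i => decide (m ≤ i)) := by rw [h]; exact List.mem_cons_self
        simpa using (List.mem_filter.mp this).2
      simp only [List.map_cons, List.head?_cons, Option.elim_some]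
      rw [if_neg (by push_cast [Nat.cast_sub him]; show ¬((i:Int) - (m:Int) = -1); omega)]
      push_cast [Nat.cast_sub him]
      ring
  · have hemp : (nlIdx cs).filter (fun i => decide (m ≤ i)) = [] := by
      apply List.filter_eq_nil_iff.mpr
      intro b hb
      have := nlIdx_lt_length cs b hb
      simp; omega
    rw [hemp, PySem.Chars.findFrom]
    have h1 : ((cs.length : Int)) < (m : Int) := by exact_mod_cast Nat.lt_of_not_le hm
    have h2 : ¬ ((m : Int) < 0) := not_lt.mpr (Int.natCast_nonneg m)
    simp only [h2, if_false]
    rw [if_pos h1]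
    simp

theorem sorted_filter_lt_getElem (l : List Nat) (hl : l.Pairwise (· < ·)) (k : Nat) (hk : k < l.length) :
    l.filter (fun i => decide (i < l[k])) = l.take k := by
  induction l generalizing k with
  | nil => simp at hk
  | cons a t ih =>
    rw [List.pairwise_cons] at hl
    cases k with
    | zero =>
      simp only [List.getElem_cons_zero, List.take_zero]
      have : ∀ b ∈ a :: t, ¬ (b < a) := by
        intro b hb
        rcases List.mem_cons.mp hb with rfl | hbt
        · omega
        · have := hl.1 b hbt; omega
      apply List.filter_eq_nil_iff.mpr
      intro b hb
      simpa using this b hb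
    | succ k' =>
      simp only [List.getElem_cons_succ, List.take_succ_cons, List.filter_cons]
      have hk' : k' < t.length := by simpa using hk
      have ha : a < t[k'] := hl.1 _ (List.getElem_mem hk')
      rw [if_pos (by simpa using ha)]
      congr 1
      exact ih hl.2 k' hk'

theorem sorted_filter_gt_getElem (l : List Nat) (hl : l.Pairwise (· < ·)) (k : Nat) (hk : k < l.length) :
    l.filter (fun i => decide (l[k] < i)) = l.drop (k + 1) := by
  induction l generalizing k with
  | nil => simp at hk
  | cons a t ih =>
    rw [List.pairwise_cons] at hl
    cases k with
    | zero =>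
      simp only [List.getElem_cons_zero, List.drop_succ_cons, List.drop_zero, List.filter_cons]
      rw [if_neg (by simp)]
      apply List.filter_eq_self.mpr
      intro b hb
      simpa using hl.1 b hb
    | succ k' =>
      simp only [List.getElem_cons_succ, List.drop_succ_cons, List.filter_cons]
      have hk' : k' < t.length := by simpa using hk
      have ha : a < t[k'] := hl.1 _ (List.getElem_mem hk')
      rw [if_neg (by simp; omega)]
      exact ih hl.2 k' hk'

theorem take_getLast? (l : List Nat) (m : Nat) (hm : m ≤ l.length) :
    (l.take m).getLast? = if h : 0 < m then some (l[m-1]'(by omega)) else none := by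
  split
  · rw [List.getLast?_eq_getElem?]
    have hlen : (l.take m).length = m := by simp; omega
    rw [hlen, List.getElem?_take]
    rw [if_pos (by omega), List.getElem?_eq_getElem (by omega)]
  · have : m = 0 := by omega
    subst this
    simp

def beforeL (cs : List Char) (idxN : Nat) : List Nat :=
  (nlIdx cs).filter (fun i => decide (i < idxN))

def backS (cs : List Char) (idxN : Nat) (k : Nat) : Int :=
  (((beforeL cs idxN).reverse)[k]?).elim 0 (fun i => (i : Int))

theorem beforeL_pairwise (cs : List Char) (idxN : Nat) : (beforeL cs idxN).Pairwise (· < ·) :=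
  List.Pairwise.filter _ (nlIdx_pairwise cs)

theorem back_base (cs : List Char) (idxN : Nat) (hidx : idxN ≤ cs.length) :
    max 0 (PySem.Chars.rfindFrom cs ['\n'] 0 (some (idxN : Int))) = backS cs idxN 0 := by
  rw [rfindFrom_nl cs idxN hidx]
  unfold backS beforeL
  rw [← List.head?_reverse]
  cases h : ((nlIdx cs).filter (fun i => decide (i < idxN))).reverse with
  | nil => simp
  | cons p r => simp [List.head?_cons]

theorem back_step (cs : List Char) (idxN : Nat) (k : Nat) :
    max 0 (PySem.Chars.rfindFrom cs ['\n'] 0 (some (backS cs idxN k))) = backS cs idxN (k + 1) := by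
  cases hk : ((beforeL cs idxN).reverse)[k]? with
  | none =>
    have hlen : (beforeL cs idxN).length ≤ k := by
      have := List.getElem?_eq_none_iff.mp hk
      simpa using this
    have hS : backS cs idxN k = ((0 : Nat) : Int) := by unfold backS; rw [hk]; simp
    rw [hS, rfindFrom_nl cs 0 (by omega)]
    have hf : (nlIdx cs).filter (fun i => decide (i < 0)) = [] := by
      apply List.filter_eq_nil_iff.mpr; intro b _; simp
    rw [hf]
    unfold backS
    rw [List.getElem?_eq_none (by rw [List.length_reverse]; omega)]
    simp
  | some p =>
    have hk' : k < (beforeL cs idxN).length := by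
      have := List.getElem?_eq_some_iff.mp hk
      simpa using this.choose
    set b := beforeL cs idxN with hb
    have hrev : b.reverse[k]? = b[b.length - 1 - k]? := by
      rw [List.getElem?_reverse (by simpa using hk')]
    set m := b.length - 1 - k with hm
    have hpm : b[m]? = some p := by rw [← hrev, hk]
    have hmlt : m < b.length := by omega
    have hpe : b[m]'hmlt = p := by
      have := List.getElem?_eq_some_iff.mp hpm
      exact this.choose_spec
    have hpmem : p ∈ b := by rw [← hpe]; exact List.getElem_mem hmlt
    have hplt : p < idxN := by
      have := (List.mem_filter.mp (hb ▸ hpmem)).2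
      simpa using this
    have hpnl : p ∈ nlIdx cs := (List.mem_filter.mp (hb ▸ hpmem)).1
    have hplen : p ≤ cs.length := le_of_lt (nlIdx_lt_length cs p hpnl)
    have hS : backS cs idxN k = ((p : Nat) : Int) := by unfold backS; rw [← hb, hk]; simp
    rw [hS, rfindFrom_nl cs p hplen]
    -- (nlIdx cs).filter (· < p) = b.filter (· < p) = b.take m
    have hff : (nlIdx cs).filter (fun i => decide (i < p)) = b.filter (fun i => decide (i < p)) := by
      rw [hb]
      unfold beforeL
      rw [List.filter_filter]
      apply List.filter_congr
      intro a _
      by_cases h' : a < p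
      · have : a < idxN := by omega
        simp [h', this]
      · simp [h']
    have htake : b.filter (fun i => decide (i < p)) = b.take m := by
      have := sorted_filter_lt_getElem b (hb ▸ beforeL_pairwise cs idxN) m hmlt
      rw [hpe] at this
      exact this
    rw [hff, htake, take_getLast? b m (le_of_lt hmlt)]
    by_cases hm0 : 0 < m
    · rw [dif_pos hm0]
      simp only [Option.elim_some]
      have : backS cs idxN (k+1) = ((b[m-1]'(by omega) : Nat) : Int) := by
        unfold backS
        rw [← hb]
        rw [List.getElem?_reverse (by omega : k + 1 < b.length)]
        have he : b.length - 1 - (k+1) = m - 1 := by omega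
        rw [he, List.getElem?_eq_getElem (by omega)]
        simp
      rw [this]
      simp
    · rw [dif_neg hm0]
      simp only [Option.elim_none]
      have hk1 : b.length ≤ k + 1 := by omega
      unfold backS
      rw [List.getElem?_eq_none (by rw [List.length_reverse]; exact hb ▸ hk1)]
      simp

theorem back_chain (cs : List Char) (idxN : Nat) (hidx : idxN ≤ cs.length) :
    (PySem.List.pyRange 0 5 1).foldl
      (fun s _ => max 0 (PySem.Chars.rfindFrom cs ['\n'] 0 (some s)))
      (max 0 (PySem.Chars.rfindFrom cs ['\n'] 0 (some (idxN : Int))))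
    = backS cs idxN 5 := by
  have hr : PySem.List.pyRange 0 5 1 = [0, 1, 2, 3, 4] := by decide
  rw [hr]
  simp only [List.foldl_cons, List.foldl_nil]
  rw [back_base cs idxN hidx, back_step cs idxN 0, back_step cs idxN 1, back_step cs idxN 2,
      back_step cs idxN 3, back_step cs idxN 4]

def afterL (cs : List Char) (e0N : Nat) : List Nat :=
  (nlIdx cs).filter (fun i => decide (e0N < i))

def fwdT (cs : List Char) (e0N : Nat) (k : Nat) : Int × Bool :=
  ((afterL cs e0N)[k]?).elim ((cs.length : Int), true) (fun p => ((p : Int), false))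

theorem afterL_pairwise (cs : List Char) (e0N : Nat) : (afterL cs e0N).Pairwise (· < ·) :=
  List.Pairwise.filter _ (nlIdx_pairwise cs)

theorem fwd_base (cs : List Char) (e0N : Nat) :
    (if (false : Bool) = true then ((e0N : Int), false)
     else
       if PySem.Chars.findFrom cs ['\n'] (((e0N : Int)) + 1) none = -1 then ((cs.length : Int), true)
       else (PySem.Chars.findFrom cs ['\n'] (((e0N : Int)) + 1) none, false))
    = fwdT cs e0N 0 := by
  rw [if_neg (by simp)]
  have hc : ((e0N : Int)) + 1 = ((e0N + 1 : Nat) : Int) := by push_cast; ring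
  rw [hc, findFrom_nl cs (e0N + 1)]
  have hf : (nlIdx cs).filter (fun i => decide (e0N + 1 ≤ i)) = afterL cs e0N := by
    unfold afterL
    apply List.filter_congr
    intro a _
    simp only [decide_eq_decide]
    omega
  rw [hf]
  unfold fwdT
  rw [← List.head?_eq_getElem?]
  cases h : (afterL cs e0N).head? with
  | none => simp
  | some p =>
    simp only [Option.elim_some]
    rw [if_neg (by push_cast; simp)]

theorem fwd_step (cs : List Char) (e0N : Nat) (k : Nat) :
    (if (fwdT cs e0N k).2 = true then fwdT cs e0N k
     else
       if PySem.Chars.findFrom cs ['\n'] ((fwdT cs e0N k).1 + 1) none = -1 then ((cs.length : Int), true)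
       else (PySem.Chars.findFrom cs ['\n'] ((fwdT cs e0N k).1 + 1) none, false))
    = fwdT cs e0N (k + 1) := by
  cases hk : (afterL cs e0N)[k]? with
  | none =>
    have hlen : (afterL cs e0N).length ≤ k := by
      have := List.getElem?_eq_none_iff.mp hk
      simpa using this
    have hT : fwdT cs e0N k = ((cs.length : Int), true) := by unfold fwdT; rw [hk]; simp
    rw [hT]
    rw [if_pos rfl]
    unfold fwdT
    rw [List.getElem?_eq_none (by omega)]
    simp
  | some p =>
    set a := afterL cs e0N with ha
    have hk' : k < a.length := by
      have := List.getElem?_eq_some_iff.mp hk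
      simpa using this.choose
    have hpe : a[k]'hk' = p := (List.getElem?_eq_some_iff.mp hk).choose_spec
    have hpmem : p ∈ a := by rw [← hpe]; exact List.getElem_mem hk'
    have hpgt : e0N < p := by
      have := (List.mem_filter.mp (ha ▸ hpmem)).2
      simpa using this
    have hT : fwdT cs e0N k = ((p : Int), false) := by unfold fwdT; rw [← ha, hk]; simp
    rw [hT]
    rw [if_neg (by simp)]
    have hc : ((p : Int)) + 1 = ((p + 1 : Nat) : Int) := by push_cast; ring
    simp only
    rw [hc, findFrom_nl cs (p + 1)]
    have hf : (nlIdx cs).filter (fun i => decide (p + 1 ≤ i)) = a.drop (k + 1) := by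
      have h1 : (nlIdx cs).filter (fun i => decide (p + 1 ≤ i))
          = a.filter (fun i => decide (p < i)) := by
        rw [ha]
        unfold afterL
        rw [List.filter_filter]
        apply List.filter_congr
        intro x _
        by_cases h' : p < x
        · have h2 : e0N < x := by omega
          have h3 : p + 1 ≤ x := by omega
          simp [h', h2, h3]
        · have h3 : ¬ (p + 1 ≤ x) := by omega
          simp [h', h3]
      rw [h1]
      have := sorted_filter_gt_getElem a (ha ▸ afterL_pairwise cs e0N) k hk'
      rw [hpe] at this
      exact this
    rw [hf]
    have hdrop : (a.drop (k+1)).head? = a[k+1]? := by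
      rw [List.head?_drop]
    rw [hdrop]
    unfold fwdT
    rw [← ha]
    cases h2 : a[k+1]? with
    | none => simp
    | some q =>
      simp only [Option.elim_some]
      rw [if_neg (by push_cast; simp)]

theorem foldl_const_iterate {A B : Type} (f : A → A) (l : List B) (init : A) :
    l.foldl (fun s _ => f s) init = f^[l.length] init := by
  induction l generalizing init with
  | nil => simp
  | cons x t ih => simp [Function.iterate_succ_apply, ih]

theorem fwd_iter (cs : List Char) (e0N : Nat) (k : Nat) :
    (fun (p : Int × Bool) =>
        if p.2 then p
        else
          if PySem.Chars.findFrom cs ['\n'] (p.1 + 1) none = -1 then ((cs.length : Int), true)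
          else (PySem.Chars.findFrom cs ['\n'] (p.1 + 1) none, false))^[k + 1] (((e0N : Int)), false)
      = fwdT cs e0N k := by
  induction k with
  | zero =>
    rw [Function.iterate_one]
    exact fwd_base cs e0N
  | succ k ih =>
    rw [Function.iterate_succ_apply', ih]
    exact fwd_step cs e0N k

theorem fwd_chain (cs : List Char) (e0N : Nat) :
    ((PySem.List.pyRange 0 12 1).foldl
      (fun (p : Int × Bool) _ =>
        if p.2 then p
        else
          if PySem.Chars.findFrom cs ['\n'] (p.1 + 1) none = -1 then ((cs.length : Int), true)
          else (PySem.Chars.findFrom cs ['\n'] (p.1 + 1) none, false))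
      (((e0N : Int)), false))
    = fwdT cs e0N 11 := by
  rw [foldl_const_iterate]
  have hl : (PySem.List.pyRange 0 12 1).length = 12 := by decide
  rw [hl]
  exact fwd_iter cs e0N 11

theorem b_before_eq (cs : List Char) (idxN : Nat) :
    (((nlIdx cs).map (fun i : Nat => (i : Int))).filter (fun i => decide (i < (idxN : Int))))
      = (beforeL cs idxN).map (fun i : Nat => (i : Int)) := by
  rw [List.filter_map]
  unfold beforeL
  congr 1
  apply List.filter_congr
  intro a _
  simp only [Function.comp_apply, decide_eq_decide]
  exact_mod_cast Iff.rfl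

theorem b_start_eq (cs : List Char) (idxN : Nat) :
    (if 6 ≤ (((nlIdx cs).map (fun i : Nat => (i : Int))).filter (fun i => decide (i < (idxN : Int)))).length
     then (PySem.List.pyGet? (((nlIdx cs).map (fun i : Nat => (i : Int))).filter (fun i => decide (i < (idxN : Int)))) (-6)).getD 0
     else 0) = backS cs idxN 5 := by
  rw [b_before_eq]
  set b := beforeL cs idxN with hb
  rw [List.length_map]
  by_cases h6 : 6 ≤ b.length
  · rw [if_pos h6]
    have hidx : PySem.List.pyIdx? (b.map (fun i : Nat => (i : Int))).length (-6) = some (b.length - 6) := by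
      rw [List.length_map]
      unfold PySem.List.pyIdx?
      rw [if_neg (by norm_num)]
      rw [if_pos (by omega)]
      simp
    unfold PySem.List.pyGet?
    rw [hidx]
    simp only [Option.bind_some]
    rw [List.getElem?_map]
    rw [List.getElem?_eq_getElem (by omega)]
    unfold backS
    rw [← hb]
    rw [List.getElem?_reverse (by omega : 5 < b.length)]
    rw [List.getElem?_eq_getElem (by omega)]
    simp only [Option.map_some, Option.getD_some, Option.elim_some]
    congr 2
  · rw [if_neg h6]
    unfold backS
    rw [← hb, List.getElem?_eq_none (by rw [List.length_reverse]; omega)]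
    simp

theorem b_after_eq (cs : List Char) (e0N : Nat) :
    (((nlIdx cs).map (fun i : Nat => (i : Int))).filter (fun i => decide ((e0N : Int) < i)))
      = (afterL cs e0N).map (fun i : Nat => (i : Int)) := by
  rw [List.filter_map]
  unfold afterL
  congr 1
  apply List.filter_congr
  intro a _
  simp only [Function.comp_apply, decide_eq_decide]
  exact_mod_cast Iff.rfl

theorem b_end_eq (cs : List Char) (e0N : Nat) :
    (if 12 ≤ (((nlIdx cs).map (fun i : Nat => (i : Int))).filter (fun i => decide ((e0N : Int) < i))).length
     then (PySem.List.pyGet? (((nlIdx cs).map (fun i : Nat => (i : Int))).filter (fun i => decide ((e0N : Int) < i))) 11).getD 0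
     else (cs.length : Int)) = (fwdT cs e0N 11).1 := by
  rw [b_after_eq]
  set a := afterL cs e0N with ha
  rw [List.length_map]
  by_cases h12 : 12 ≤ a.length
  · rw [if_pos h12]
    have hidx : PySem.List.pyIdx? (a.map (fun i : Nat => (i : Int))).length 11 = some 11 := by
      rw [List.length_map]
      unfold PySem.List.pyIdx?
      rw [if_pos (by norm_num)]
      rw [if_pos (by omega)]
      simp
    unfold PySem.List.pyGet?
    rw [hidx]
    simp only [Option.bind_some]
    rw [List.getElem?_map, List.getElem?_eq_getElem (by omega)]
    unfold fwdT
    rw [← ha, List.getElem?_eq_getElem (by omega)]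
    simp
  · rw [if_neg h12]
    unfold fwdT
    rw [← ha, List.getElem?_eq_none (by omega)]
    simp

theorem main_eq (fc bm : String) : get_surrounding_lines fc bm = get_surrounding_lines_alt fc bm := by
  unfold get_surrounding_lines get_surrounding_lines_alt
  by_cases h : PySem.Str.find fc bm = -1
  · simp only [h]
    norm_num
  · simp only [h, ne_eq, not_false_eq_true, if_pos, if_neg]
    have hnl : ("\n" : String).toList = ['\n'] := rfl
    have hF0 : 0 ≤ PySem.Str.find fc bm := by
      have := PySem.Chars.neg_one_le_find fc.toList bm.toList
      rw [PySem.Str.find_eq] at h ⊢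
      omega
    have hFlen : PySem.Str.find fc bm ≤ (fc.toList.length : Int) := by
      rw [PySem.Str.find_eq]
      exact PySem.Chars.find_le_length fc.toList bm.toList
    set F := PySem.Str.find fc bm with hFdef
    set idxN : Nat := F.toNat with hidxN
    have hFe : F = (idxN : Int) := (Int.toNat_of_nonneg hF0).symm
    have hidxle : idxN ≤ fc.toList.length := by omega
    set e0N : Nat := idxN + bm.toList.length with he0N
    have hE : F + PySem.Str.len bm = (e0N : Int) := by
      rw [PySem.Str.len_eq, hFe, he0N]; push_cast; ring
    have hlen : PySem.Str.len fc = (fc.toList.length : Int) := PySem.Str.len_eq fc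
    -- A-side start
    have hA1 : (PySem.List.pyRange 0 5 1).foldl
        (fun s _ => max 0 (PySem.Str.rfindFrom fc "\n" 0 (some s)))
        (max 0 (PySem.Str.rfindFrom fc "\n" 0 (some F)))
        = backS fc.toList idxN 5 := by
      have hrw : ∀ z : Int, PySem.Str.rfindFrom fc "\n" 0 (some z)
          = PySem.Chars.rfindFrom fc.toList ['\n'] 0 (some z) := by
        intro z
        rw [PySem.Str.rfindFrom_eq, hnl]
      simp only [hrw, hFe]
      exact back_chain fc.toList idxN hidxle
    -- A-side end
    have hA2 : ((PySem.List.pyRange 0 12 1).foldl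
        (fun (p : Int × Bool) _ =>
          if p.2 then p
          else
            let e := PySem.Str.findFrom fc "\n" (p.1 + 1) none
            if e = -1 then (PySem.Str.len fc, true) else (e, false))
        (F + PySem.Str.len bm, false))
        = fwdT fc.toList e0N 11 := by
      have hrw : ∀ z : Int, PySem.Str.findFrom fc "\n" z none
          = PySem.Chars.findFrom fc.toList ['\n'] z none := by
        intro z
        rw [PySem.Str.findFrom_eq, hnl]
      simp only [hrw, hE, hlen]
      exact fwd_chain fc.toList e0N
    -- B-side lists
    have hnls : ((PySem.List.enumerate fc.toList 0).filter (fun p => p.2 == '\n')).map (·.1)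
        = (nlIdx fc.toList).map (fun i : Nat => (i : Int)) := by
      rw [nlIdx_enumerate]
      congr 1
      funext i
      simp
    rw [hA1, hA2, hnls]
    have hB1 : ((nlIdx fc.toList).map (fun i : Nat => (i : Int))).filter (fun i => i < F)
        = ((nlIdx fc.toList).map (fun i : Nat => (i : Int))).filter (fun i => decide (i < (idxN : Int))) := by
      rw [hFe]
    have hB2 : ((nlIdx fc.toList).map (fun i : Nat => (i : Int))).filter (fun i => F + PySem.Str.len bm < i)
        = ((nlIdx fc.toList).map (fun i : Nat => (i : Int))).filter (fun i => decide ((e0N : Int) < i)) := by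
      rw [hE]
    rw [hB1, hB2, hlen, b_start_eq fc.toList idxN, b_end_eq fc.toList e0N]

-- ===== VERDICT (by name: the statement is the Claim_ definition above) =====
theorem get_surrounding_lines_spec : Claim_equal_get_surrounding_lines := by
  intro fc bm _
  unfold Spec_get_surrounding_lines
  exact main_eq fc bm
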